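-- pv_equiv track=rewrite | github.com/youngsfortech/big-data-squad | backend/main.py | contains_invalid_combination
-- ===== SOURCE A (Python) =====
-- INVALID_COMBINATIONS = ["nb", "mk", "dt", "bp", "sz", "nk"]
--
-- def contains_invalid_combination(word: str) -> bool:
--     """Vérifier les combinaisons phonotactiques invalides"""
--     word = word.lower()
--     for combo in INVALID_COMBINATIONS:
--         if combo in word:
--             if combo == "nk" and word.index(combo) > 0:
--                 continue
--             return True
--     return False
-- ===== SOURCE B (Python) =====
-- INVALID_PAIRS = {"nb", "mk", "dt", "bp", "sz"}
--
-- def contains_invalid_combination(word: str) -> bool: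
--     """Vérifier les combinaisons phonotactiques invalides"""
--     w = word.lower()
--     for i in range(len(w) - 1):
--         pair = w[i:i + 2]
--         if pair in INVALID_PAIRS or (i == 0 and pair == "nk"):
--             return True
--     return False
-- ===== Notes on version B (the rewrite author's own statement) =====
-- stated objective: alternative
-- what changed: Replaces six independent per-pattern substring scans (with an extra .index pass for the start-only pattern) by ONE left-to-right pass over the word's adjacent character pairs checked against a set, accepting the start-only pattern solely at position 0.
import Mathlib
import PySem

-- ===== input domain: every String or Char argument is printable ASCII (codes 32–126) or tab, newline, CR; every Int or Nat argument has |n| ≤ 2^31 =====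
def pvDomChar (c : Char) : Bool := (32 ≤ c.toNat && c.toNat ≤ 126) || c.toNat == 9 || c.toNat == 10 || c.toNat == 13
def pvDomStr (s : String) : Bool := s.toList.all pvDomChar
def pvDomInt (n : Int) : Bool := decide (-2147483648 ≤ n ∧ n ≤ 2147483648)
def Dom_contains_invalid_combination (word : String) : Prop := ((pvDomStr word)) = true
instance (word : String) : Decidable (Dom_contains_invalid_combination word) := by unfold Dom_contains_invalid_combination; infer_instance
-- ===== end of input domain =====

-- B replaces A's six per-pattern substring scans by one pass over adjacent character
-- pairs checked against a set (the start-only pattern accepted solely at position 0); alternative decomposition, return value proved equal.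


-- ===== PORT A =====
-- INVALID_COMBINATIONS = ["nb", "mk", "dt", "bp", "sz", "nk"]
def INVALID_COMBINATIONS : List (List Char) :=
  [['n','b'], ['m','k'], ['d','t'], ['b','p'], ['s','z'], ['n','k']]

-- the 'for combo in INVALID_COMBINATIONS' loop; word.index(combo) is guarded by
-- 'combo in word', so it is Chars.find (which then is ≥ 0, never the ValueError case)
def aLoop (w : List Char) : List (List Char) → Bool
  | [] => false
  | combo :: rest =>
    if PySem.Chars.isIn combo w then
      if combo = ['n','k'] ∧ PySem.Chars.find w combo > 0 then aLoop w rest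
      else true
    else aLoop w rest

def contains_invalid_combination (word : String) : Bool :=
  aLoop (PySem.Chars.lower word.toList) INVALID_COMBINATIONS

-- ===== PORT B =====
-- INVALID_PAIRS = {"nb", "mk", "dt", "bp", "sz"}  (a 5-element set of 2-char strings)
def INVALID_PAIRS : List (List Char) :=
  [['n','b'], ['m','k'], ['d','t'], ['b','p'], ['s','z']]

-- 'for i in range(len(w)-1): pair = w[i:i+2]; …' — one pass over adjacent pairs;
-- 'first' tracks 'i == 0'
def bScan (first : Bool) : List Char → Bool
  | c1 :: c2 :: rest =>
    if INVALID_PAIRS.contains [c1, c2] || (first && c1 == 'n' && c2 == 'k') then true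
    else bScan false (c2 :: rest)
  | _ => false

def contains_invalid_combination_alt (word : String) : Bool :=
  bScan true (PySem.Chars.lower word.toList)

-- ===== PRECONDITION & SPEC =====
def Spec_contains_invalid_combination (word : String) (out : Bool) : Prop := out = contains_invalid_combination_alt word
instance (word : String) (out : Bool) : Decidable (Spec_contains_invalid_combination word out) := by unfold Spec_contains_invalid_combination; infer_instance

-- ===== CLAIM (what is proved, stated in full; the proofs are below) =====
def Claim_equal_contains_invalid_combination : Prop := ∀ (word : String), Dom_contains_invalid_combination word → Spec_contains_invalid_combination word (contains_invalid_combination word)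

-- ===== LEMMAS AND PROOFS =====

-- 'nk' found at index > 0 fails; so A's nk-clause accepts exactly the words with 'nk' as a prefix
lemma nk_clause (w : List Char) :
    (PySem.Chars.isIn ['n','k'] w = true ∧ ¬ PySem.Chars.find w ['n','k'] > 0) ↔ ['n','k'] <+: w := by
  constructor
  · rintro ⟨hin, hle⟩
    have hnn : 0 ≤ PySem.Chars.find w ['n','k'] :=
      (PySem.Chars.find_nonneg_iff w ['n','k']).2 ((PySem.Chars.isIn_iff_infix _ _).1 hin)
    have h0 : PySem.Chars.find w ['n','k'] = 0 := by omega
    have := (PySem.Chars.find_spec hnn).1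
    simpa [h0] using this
  · intro hpre
    have hinf : ['n','k'] <:+: w := hpre.isInfix
    have hin : PySem.Chars.isIn ['n','k'] w = true := (PySem.Chars.isIn_iff_infix _ _).2 hinf
    refine ⟨hin, ?_⟩
    intro hgt
    have hnn : 0 ≤ PySem.Chars.find w ['n','k'] := le_of_lt hgt
    have hspec := (PySem.Chars.find_spec hnn).2
    have : ¬ ['n','k'] <+: w.drop 0 := hspec 0 (by omega)
    simp at this
    exact this hpre

-- characterisation of A's loop over the literal pattern list
lemma aLoop_iff (w : List Char) :
    aLoop w INVALID_COMBINATIONS = true ↔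
      (['n','b'] <:+: w ∨ ['m','k'] <:+: w ∨ ['d','t'] <:+: w ∨ ['b','p'] <:+: w ∨
       ['s','z'] <:+: w) ∨ ['n','k'] <+: w := by
  have hnk := nk_clause w
  simp only [INVALID_COMBINATIONS, aLoop]
  by_cases h1 : PySem.Chars.isIn ['n','b'] w = true <;>
  by_cases h2 : PySem.Chars.isIn ['m','k'] w = true <;>
  by_cases h3 : PySem.Chars.isIn ['d','t'] w = true <;>
  by_cases h4 : PySem.Chars.isIn ['b','p'] w = true <;>
  by_cases h5 : PySem.Chars.isIn ['s','z'] w = true <;>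
  by_cases h6 : PySem.Chars.isIn ['n','k'] w = true <;>
  by_cases h7 : PySem.Chars.find w ['n','k'] > 0 <;>
  simp_all [PySem.Chars.isIn_iff_infix]

-- 2-char infix facts specialised to the shapes the scan sees
lemma two_infix_single (a b c : Char) : ¬ [a, b] <:+: [c] := by
  simp [List.infix_cons_iff, List.cons_prefix_cons]

lemma two_infix_cons2 (a b c1 c2 : Char) (t : List Char) :
    [a, b] <:+: (c1 :: c2 :: t) ↔ (c1 = a ∧ c2 = b) ∨ [a, b] <:+: (c2 :: t) := by
  rw [List.infix_cons_iff, List.cons_prefix_cons, List.cons_prefix_cons]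
  simp [eq_comm]

lemma contains_pairs (c1 c2 : Char) :
    INVALID_PAIRS.contains [c1, c2] = true ↔
      (c1 = 'n' ∧ c2 = 'b') ∨ (c1 = 'm' ∧ c2 = 'k') ∨ (c1 = 'd' ∧ c2 = 't') ∨
      (c1 = 'b' ∧ c2 = 'p') ∨ (c1 = 's' ∧ c2 = 'z') := by
  simp [INVALID_PAIRS]

-- one unfolding step of the scan, with the 'if' turned into '||'
lemma bScan_cons (first : Bool) (c1 c2 : Char) (rest : List Char) :
    bScan first (c1 :: c2 :: rest) =
      ((INVALID_PAIRS.contains [c1, c2] || (first && c1 == 'n' && c2 == 'k')) ||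
        bScan false (c2 :: rest)) := by
  rw [bScan]
  by_cases h : (INVALID_PAIRS.contains [c1, c2] || (first && c1 == 'n' && c2 == 'k')) = true
  · rw [if_pos h, h, Bool.true_or]
  · rw [if_neg h]
    simp only [Bool.not_eq_true] at h
    rw [h, Bool.false_or]

-- characterisation of B's scan with first = false: some always-invalid pair occurs
set_option maxHeartbeats 1600000 in
lemma bScan_false_iff (w : List Char) :
    bScan false w = true ↔
      (['n','b'] <:+: w ∨ ['m','k'] <:+: w ∨ ['d','t'] <:+: w ∨ ['b','p'] <:+: w ∨
       ['s','z'] <:+: w) := by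
  induction w with
  | nil => simp [bScan]
  | cons c t ih =>
    cases t with
    | nil => simp [bScan, two_infix_single]
    | cons c2 t2 =>
      rw [two_infix_cons2, two_infix_cons2, two_infix_cons2, two_infix_cons2, two_infix_cons2]
      simp only [bScan_cons, Bool.or_eq_true, Bool.false_and, Bool.or_false,
        contains_pairs, ih]
      tauto

-- B's scan with first = true additionally accepts an 'nk' head pair
lemma bScan_true_iff (w : List Char) :
    bScan true w = true ↔ bScan false w = true ∨ ['n','k'] <+: w := by
  cases w with
  | nil => simp [bScan]
  | cons c t =>
    cases t with
    | nil => simp [bScan]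
    | cons c2 t2 =>
      simp only [bScan_cons, List.cons_prefix_cons, Bool.or_eq_true, Bool.and_eq_true,
        Bool.true_and, Bool.false_and, beq_iff_eq, contains_pairs,
        List.nil_prefix, and_true, @eq_comm _ 'n', @eq_comm _ 'k']
      tauto

lemma main_eq (w : List Char) : aLoop w INVALID_COMBINATIONS = bScan true w := by
  rw [Bool.eq_iff_iff, aLoop_iff, bScan_true_iff, bScan_false_iff]

-- ===== VERDICT (by name: the statement is the Claim_ definition above) =====
theorem contains_invalid_combination_spec : Claim_equal_contains_invalid_combination := by
  intro word _
  unfold Spec_contains_invalid_combination contains_invalid_combination contains_invalid_combination_alt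
  exact main_eq _
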